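-- pv_equiv track=rewrite | github.com/Big-Theta/EulerProblems | bintools/backup/bintools.py | binxnor
-- ===== SOURCE A (Python) =====
-- def isbin (binval):
--     if not type(binval) is str:
--         return False
--     for i in binval:
--         binset = set("01")
--         if not i in binset: return False
--     return True
--
-- def binpadleft(binval,n,padval='0'):
--     if not isbin(binval): return
--     dif = n - len(binval)
--     if dif <= 0: return binval
--     newval = binval
--     for i in range(dif):
--         newval = padval + newval
--     return newval
--
-- def binxnor(binval1,binval2):
--     n = max(len(binval1),len(binval2))
--     binval1=binpadleft(binval1,n,"0");
--     binval2=binpadleft(binval2,n,"0");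
--     retval = ""
--     for i in range(n):
--         if binval1[i] == binval2[i]:
--             retval = retval + '1'
--         else:
--             retval = retval + '0'
--     return retval
-- ===== SOURCE B (Python) =====
-- def binxnor(binval1, binval2):
--     n = max(len(binval1), len(binval2))
--     if n == 0:
--         return ''
--     a = int(binval1, 2) if binval1 else 0
--     b = int(binval2, 2) if binval2 else 0
--     x = ~(a ^ b) & ((1 << n) - 1)
--     return format(x, '0{}b'.format(n))
-- ===== Notes on version B (the rewrite author's own statement) =====
-- stated objective: idiomatic
-- what changed: Replaces the pad-then-compare-character-by-character loop with integer arithmetic: convert both strings with int(s,2), compute the XNOR as ~(a^b) masked to n bits, and format the result back as an n-wide binary string.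
import Mathlib
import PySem

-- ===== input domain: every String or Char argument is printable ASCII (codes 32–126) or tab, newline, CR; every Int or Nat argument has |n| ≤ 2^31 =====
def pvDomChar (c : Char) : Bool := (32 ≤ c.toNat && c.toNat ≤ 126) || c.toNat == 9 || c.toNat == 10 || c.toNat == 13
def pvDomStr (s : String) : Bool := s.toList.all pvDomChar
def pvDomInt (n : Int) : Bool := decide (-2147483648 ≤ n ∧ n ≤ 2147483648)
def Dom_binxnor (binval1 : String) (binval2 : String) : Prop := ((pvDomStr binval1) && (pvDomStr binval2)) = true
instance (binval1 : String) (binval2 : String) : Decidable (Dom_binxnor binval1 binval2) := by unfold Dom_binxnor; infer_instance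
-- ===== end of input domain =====

-- B replaces A's pad-then-compare-character-by-character loop by integer arithmetic: convert both
-- strings with int(s, 2), XNOR with ~(a^b) masked to n bits, format back at width n (idiomatic).

-- ===== PORT A =====
-- 'for i in binval: if not i in set("01"): return False' — membership in {'0','1'} ported as a disjunction
def isbinAux : List Char → Bool
  | [] => true
  | c :: rest => if c = '0' ∨ c = '1' then isbinAux rest else false

-- 'type(binval) is str' is always true under the String signature
def isbin (binval : String) : Bool := isbinAux binval.toList

-- returns None ('return' with no value) when not isbin
def binpadleft (binval : String) (n : Int) (padval : String) : Option String :=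
  if ¬ (isbin binval = true) then none
  else
    let dif : Int := n - binval.toList.length
    if dif ≤ 0 then some binval
    else some ((PySem.List.pyRange 0 dif 1).foldl (fun newval _ => padval ++ newval) binval)

def binxnor (binval1 : String) (binval2 : String) : String :=
  let n : Nat := max binval1.toList.length binval2.toList.length
  let b1 := binpadleft binval1 (n : Int) "0"
  let b2 := binpadleft binval2 (n : Int) "0"
  (PySem.List.pyRange 0 (n : Int) 1).foldl
    (fun retval i =>
      match b1, b2 with
      | some s1, some s2 =>
        if PySem.Str.pyGet? s1 i = PySem.Str.pyGet? s2 i then retval ++ "1" else retval ++ "0"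
      -- 'None[i]' raises TypeError in Python: excluded by Pre_binxnor; the port keeps retval
      | _, _ => retval) ""

-- ===== PORT B =====
-- hand port of int(s, 2), exact on the ASCII domain: strip whitespace, optional sign,
-- optional 0b/0B prefix (one '_' allowed after it), then '0'/'1' digits with single
-- underscores between digits; none = ValueError
def int2Sign : List Char → Int × List Char
  | '+' :: rest => (1, rest)
  | '-' :: rest => (-1, rest)
  | l => (1, l)

def int2Prefix : List Char → List Char
  | '0' :: 'b' :: rest => match rest with | '_' :: r => r | _ => rest
  | '0' :: 'B' :: rest => match rest with | '_' :: r => r | _ => rest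
  | l => l

def int2Digits (acc : Nat) : List Char → Option Nat
  | [] => some acc
  | '_' :: c :: rest =>
      if c = '0' ∨ c = '1' then int2Digits (2 * acc + (if c = '1' then 1 else 0)) rest else none
  | ['_'] => none
  | c :: rest =>
      if c = '0' ∨ c = '1' then int2Digits (2 * acc + (if c = '1' then 1 else 0)) rest else none

def int2? (l : List Char) : Option Int :=
  let t := ((l.dropWhile PySem.Chars.isspace).reverse.dropWhile PySem.Chars.isspace).reverse
  match int2Sign t with
  | (sgn, l1) =>
    match int2Prefix l1 with
    | [] => none
    | c :: rest =>
      if c = '0' ∨ c = '1' then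
        (int2Digits (if c = '1' then 1 else 0) rest).map (fun v : Nat => sgn * (v : Int))
      else none

def binxnor_alt (binval1 : String) (binval2 : String) : String :=
  let n : Nat := max binval1.toList.length binval2.toList.length
  if n = 0 then ""
  else
    -- int(_, 2) raising ValueError in Python is 'none' here: outside Pre_binxnor; the port returns ""
    match (if binval1 ≠ "" then int2? binval1.toList else some 0) with
    | none => ""
    | some a =>
      match (if binval2 ≠ "" then int2? binval2.toList else some 0) with
      | none => ""
      | some b =>
        -- Python's ~, ^, & on int are Int.lnot / Int.xor / Int.land (two's complement)
        let x : Int := Int.land (Int.lnot (Int.xor a b)) (((1 : Int) <<< n) - 1)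
        -- format(x, '0{n}b') with 0 ≤ x < 2^n: exactly the n bits of x, most significant first
        String.ofList ((List.range n).map (fun i => if x.testBit (n - 1 - i) then '1' else '0'))

-- ===== PRECONDITION & SPEC =====
-- Pre_ excludes inputs containing a character other than '0'/'1': there binpadleft returns
-- None and A raises TypeError on None[i].
def Pre_binxnor (binval1 : String) (binval2 : String) : Prop :=
  (binval1.toList.all (fun c => c == '0' || c == '1')) = true ∧
  (binval2.toList.all (fun c => c == '0' || c == '1')) = true
instance (binval1 : String) (binval2 : String) : Decidable (Pre_binxnor binval1 binval2) := by
  unfold Pre_binxnor; infer_instance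

def pvWitness_binxnor : String × String := ("101", "1")

def Spec_binxnor (binval1 : String) (binval2 : String) (out : String) : Prop := out = binxnor_alt binval1 binval2
instance (binval1 : String) (binval2 : String) (out : String) : Decidable (Spec_binxnor binval1 binval2 out) := by unfold Spec_binxnor; infer_instance

-- ===== CLAIM (what is proved, stated in full; the proofs are below) =====
def Claim_equal_binxnor : Prop := ∀ (binval1 : String) (binval2 : String), Dom_binxnor binval1 binval2 → Pre_binxnor binval1 binval2 → Spec_binxnor binval1 binval2 (binxnor binval1 binval2)

-- ===== LEMMAS AND PROOFS =====

def parseN (l : List Char) : Nat := l.foldl (fun a c => 2 * a + (if c = '1' then 1 else 0)) 0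

def padL (l : List Char) (n : Nat) : List Char := List.replicate (n - l.length) '0' ++ l

theorem isbin_iff (s : String) : isbin s = true ↔ ∀ c ∈ s.toList, c = '0' ∨ c = '1' := by
  unfold isbin
  induction s.toList with
  | nil => simp [isbinAux]
  | cons c rest ih =>
    simp only [isbinAux, List.mem_cons]
    split_ifs with h
    · rw [ih]
      constructor
      · rintro hall x (rfl | hx)
        · exact h
        · exact hall x hx
      · intro hall x hx; exact hall x (Or.inr hx)
    · constructor
      · intro hf; cases hf
      · intro hall; exact absurd (hall c (Or.inl rfl)) h

theorem int2Digits_binary (l : List Char) (hb : ∀ c ∈ l, c = '0' ∨ c = '1') (acc : Nat) :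
    int2Digits acc l = some (l.foldl (fun a c => 2 * a + (if c = '1' then 1 else 0)) acc) := by
  induction l generalizing acc with
  | nil => rfl
  | cons c rest ih =>
    have hbr : ∀ x ∈ rest, x = '0' ∨ x = '1' := fun x hx => hb x (List.mem_cons_of_mem _ hx)
    have hc : c = '0' ∨ c = '1' := hb c List.mem_cons_self
    rcases hc with rfl | rfl <;> simp [int2Digits, ih hbr, List.foldl_cons]

theorem dropWhile_isspace_binary (l : List Char) (hb : ∀ c ∈ l, c = '0' ∨ c = '1') :
    l.dropWhile PySem.Chars.isspace = l := by
  cases l with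
  | nil => rfl
  | cons c rest =>
    rcases hb c List.mem_cons_self with rfl | rfl <;> rfl

theorem int2_binary (s : String) (hb : ∀ c ∈ s.toList, c = '0' ∨ c = '1') :
    (if s ≠ "" then int2? s.toList else some 0) = some ((parseN s.toList : Nat) : Int) := by
  by_cases h : s = ""
  · subst h; simp [parseN]
  · rw [if_pos h]
    have hbr : ∀ c ∈ s.toList.reverse, c = '0' ∨ c = '1' := by
      intro c hc; exact hb c (List.mem_reverse.mp hc)
    unfold int2?
    rw [dropWhile_isspace_binary s.toList hb, dropWhile_isspace_binary s.toList.reverse hbr,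
        List.reverse_reverse]
    obtain ⟨c, rest, hcr⟩ : ∃ c rest, s.toList = c :: rest := by
      cases hl : s.toList with
      | nil => exact absurd (by simpa using congrArg String.ofList hl) h
      | cons c rest => exact ⟨c, rest, rfl⟩
    rw [hcr]
    have hbrs : ∀ x ∈ rest, x = '0' ∨ x = '1' := by
      intro x hx; exact hb x (hcr ▸ List.mem_cons_of_mem _ hx)
    have hc : c = '0' ∨ c = '1' := hb c (hcr ▸ List.mem_cons_self)
    have hsign : int2Sign (c :: rest) = (1, c :: rest) := by
      rcases hc with rfl | rfl <;> rfl
    dsimp only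
    rw [hsign]
    have hpre : int2Prefix (c :: rest) = c :: rest := by
      rcases hc with rfl | rfl
      · cases rest with
        | nil => rfl
        | cons c2 r2 => rcases hbrs c2 List.mem_cons_self with rfl | rfl <;> rfl
      · rfl
    rw [hpre]
    dsimp only
    rw [if_pos hc, int2Digits_binary rest hbrs]
    simp only [Option.map_some]
    rcases hc with rfl | rfl <;> simp [parseN, List.foldl_cons]

theorem parseN_append_singleton (l : List Char) (c : Char) :
    parseN (l ++ [c]) = 2 * parseN l + (if c = '1' then 1 else 0) := by
  simp [parseN, List.foldl_append]

theorem parseN_testBit (l : List Char) (hb : ∀ c ∈ l, c = '0' ∨ c = '1') (k : Nat) :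
    (parseN l).testBit k = decide (k < l.length ∧ l[l.length - 1 - k]? = some '1') := by
  induction l using List.reverseRecOn generalizing k with
  | nil => simp [parseN, Nat.zero_testBit]
  | append_singleton l c ih =>
    have hbl : ∀ x ∈ l, x = '0' ∨ x = '1' := fun x hx => hb x (List.mem_append_left _ hx)
    have hd : (if c = '1' then 1 else 0) ≤ 1 := by split <;> omega
    rw [parseN_append_singleton]
    cases k with
    | zero =>
      rw [Nat.testBit_zero]
      have hmod : (2 * parseN l + (if c = '1' then 1 else 0)) % 2 = (if c = '1' then 1 else 0) := by
        omega
      rw [hmod]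
      have hidx : (l ++ [c]).length - 1 - 0 = l.length := by simp
      rw [hidx, List.getElem?_concat_length]
      rcases hb c (List.mem_append_right _ (List.mem_singleton_self c)) with rfl | rfl <;> simp
    | succ k =>
      rw [Nat.testBit_succ]
      have hdiv : (2 * parseN l + (if c = '1' then 1 else 0)) / 2 = parseN l := by omega
      rw [hdiv, ih hbl]
      by_cases hk : k < l.length
      · have h1 : (l ++ [c]).length - 1 - (k + 1) = l.length - 1 - k := by
          simp only [List.length_append, List.length_singleton]; omega
        have h2 : (l ++ [c])[l.length - 1 - k]? = l[l.length - 1 - k]? :=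
          List.getElem?_append_left (l₁ := l) (l₂ := [c]) (by omega)
        rw [h1, h2, decide_eq_decide]
        have h3 : (k < l.length) ↔ (k + 1 < (l ++ [c]).length) := by
          simp only [List.length_append, List.length_singleton]; omega
        exact and_congr_left' h3
      · have h4 : ¬ (k + 1 < (l ++ [c]).length) := by
          simp only [List.length_append, List.length_singleton]; omega
        simp only [decide_eq_decide]
        constructor <;> intro hcontra <;> [exact absurd hcontra.1 hk; exact absurd hcontra.1 h4]

theorem mask_testBit (n k : Nat) : (((1 : Int) <<< n) - 1).testBit k = decide (k < n) := by
  have h1 : ((1 : Int) <<< n) - 1 = ((2 ^ n - 1 : Nat) : Int) := by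
    rw [Int.shiftLeft_eq]
    have : (1:ℕ) ≤ 2 ^ n := Nat.one_le_two_pow
    push_cast [this]; ring
  rw [h1]
  have h2 : (((2 ^ n - 1 : Nat) : Int)).testBit k = (2 ^ n - 1 : Nat).testBit k := by
    simp [Int.testBit]
  rw [h2, Nat.testBit_two_pow_sub_one]

theorem int_testBit_natCast (m k : Nat) : ((m : Nat) : Int).testBit k = m.testBit k := by
  simp [Int.testBit]

theorem foldl_prepend_zero {α : Type} (l : List α) (t : String) :
    l.foldl (fun (v : String) (_ : α) => "0" ++ v) t
      = String.ofList (List.replicate l.length '0' ++ t.toList) := by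
  induction l generalizing t with
  | nil => apply String.ext; simp
  | cons a l ih =>
    rw [List.foldl_cons, ih]
    apply String.ext
    simp [List.replicate_succ']

theorem binpadleft_eq (s : String) (n : Nat) (hb : isbin s = true) (hn : s.toList.length ≤ n) :
    binpadleft s (n : Int) "0" = some (String.ofList (padL s.toList n)) := by
  unfold binpadleft
  rw [if_neg (by simp [hb])]
  by_cases h : (n : Int) - s.toList.length ≤ 0
  · rw [if_pos h]
    have hlen : s.toList.length = n := by omega
    unfold padL
    rw [hlen]
    simp

  · rw [if_neg h]
    rw [PySem.List.pyRange_one, List.foldl_map, foldl_prepend_zero]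
    unfold padL
    congr 2
    simp


theorem foldl_strbits (p : Int → Prop) [DecidablePred p] (l : List Int) (t : String) :
    (l.foldl (fun r i => if p i then r ++ "1" else r ++ "0") t).toList
      = t.toList ++ l.map (fun i => if p i then '1' else '0') := by
  induction l generalizing t with
  | nil => simp
  | cons a l ih =>
    rw [List.foldl_cons]
    by_cases h : p a
    · rw [if_pos h, ih]; simp [h]
    · rw [if_neg h, ih]; simp [h]

theorem padL_bit (l : List Char) (hb : ∀ c ∈ l, c = '0' ∨ c = '1') (n i : Nat)
    (hln : l.length ≤ n) (hi : i < n) :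
    (parseN l).testBit (n - 1 - i) = decide ((padL l n)[i]? = some '1') := by
  rw [parseN_testBit l hb, decide_eq_decide]
  by_cases hc : i < n - l.length
  · have hz : (padL l n)[i]? = some '0' := by
      unfold padL
      rw [List.getElem?_append_left (by simp [List.length_replicate]; omega)]
      simp [hc]
    rw [hz]
    constructor
    · rintro ⟨h1, -⟩; omega
    · intro h; exact absurd h (by decide)
  · have hz : (padL l n)[i]? = l[i - (n - l.length)]? := by
      unfold padL
      rw [List.getElem?_append_right (by simp [List.length_replicate]; omega)]
      congr 1
      simp [List.length_replicate]
    rw [hz]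
    have hidx : l.length - 1 - (n - 1 - i) = i - (n - l.length) := by omega
    have hlt : n - 1 - i < l.length := by omega
    rw [hidx]
    simp [hlt]

theorem padL_mem {c : Char} {l : List Char} {n : Nat} (h : c ∈ padL l n)
    (hb : ∀ x ∈ l, x = '0' ∨ x = '1') : c = '0' ∨ c = '1' := by
  unfold padL at h
  rcases List.mem_append.mp h with h | h
  · exact Or.inl (List.eq_of_mem_replicate h)
  · exact hb c h

-- ===== VERDICT (by name: the statement is the Claim_ definition above) =====
theorem binxnor_spec : Claim_equal_binxnor := by
  unfold Claim_equal_binxnor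
  intro b1 b2 _ hpre
  unfold Spec_binxnor
  obtain ⟨hb1', hb2'⟩ := hpre
  have hb1 : ∀ c ∈ b1.toList, c = '0' ∨ c = '1' := by
    intro c hc
    have := List.all_eq_true.mp hb1' c hc
    simpa using this
  have hb2 : ∀ c ∈ b2.toList, c = '0' ∨ c = '1' := by
    intro c hc
    have := List.all_eq_true.mp hb2' c hc
    simpa using this
  simp only [binxnor, binxnor_alt]
  set n : Nat := max b1.toList.length b2.toList.length with hn
  by_cases h0 : n = 0
  · rw [if_pos h0, h0]
    simp
  · rw [if_neg h0]
    rw [binpadleft_eq b1 n ((isbin_iff b1).mpr hb1) (le_max_left _ _),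
        binpadleft_eq b2 n ((isbin_iff b2).mpr hb2) (le_max_right _ _)]
    rw [int2_binary b1 hb1, int2_binary b2 hb2]
    apply String.ext
    rw [foldl_strbits]
    simp only [String.toList_ofList]
    rw [PySem.List.pyRange_one]
    simp only [Int.sub_zero, Int.toNat_natCast, List.map_map]
    apply List.map_congr_left
    intro i hi
    have hin : i < n := List.mem_range.mp hi
    simp only [Function.comp]
    have hg1 : PySem.Str.pyGet? (String.ofList (padL b1.toList n)) ((0:Int) + i)
        = (padL b1.toList n)[i]? := by
      simp
    have hg2 : PySem.Str.pyGet? (String.ofList (padL b2.toList n)) ((0:Int) + i)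
        = (padL b2.toList n)[i]? := by
      simp
    rw [hg1, hg2]
    rw [Int.testBit_land, Int.testBit_lnot, Int.testBit_lxor, mask_testBit,
        int_testBit_natCast, int_testBit_natCast,
        padL_bit b1.toList hb1 n i (le_max_left _ _) hin,
        padL_bit b2.toList hb2 n i (le_max_right _ _) hin]
    have hnn : n - 1 - i < n := by omega
    have hd : decide (n - 1 - i < n) = true := by simpa using hnn
    rw [hd, Bool.and_true]
    have hlen1 : i < (padL b1.toList n).length := by
      simp [padL, List.length_replicate]; omega
    have hlen2 : i < (padL b2.toList n).length := by
      simp [padL, List.length_replicate]; omega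
    obtain ⟨c1, hc1⟩ : ∃ c, (padL b1.toList n)[i]? = some c :=
      ⟨_, List.getElem?_eq_getElem hlen1⟩
    obtain ⟨c2, hc2⟩ : ∃ c, (padL b2.toList n)[i]? = some c :=
      ⟨_, List.getElem?_eq_getElem hlen2⟩
    have hm1 : c1 = '0' ∨ c1 = '1' :=
      padL_mem (List.mem_of_getElem? hc1) hb1
    have hm2 : c2 = '0' ∨ c2 = '1' :=
      padL_mem (List.mem_of_getElem? hc2) hb2
    rw [hc1, hc2]
    rcases hm1 with rfl | rfl <;> rcases hm2 with rfl | rfl <;> simp
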